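-- pv_equiv track=rewrite | github.com/ywatanabe1989/scitex-python | pac_collections/dev/download_pac_mcp.py | categorize_papers
-- ===== SOURCE A (Python) =====
-- def categorize_papers(papers):
--     """Categorize papers by source."""
--     categories = {
--         'pubmed': [],
--         'frontiers': [],
--         'nature': [],
--         'science': [],
--         'sciencedirect': [],
--         'ieee': [],
--         'other': []
--     }
--
--     for paper in papers:
--         url = paper['url'].lower()
--         if 'ncbi.nlm.nih.gov' in url or 'pubmed' in url:
--             categories['pubmed'].append(paper)
--         elif 'frontiersin.org' in url:
--             categories['frontiers'].append(paper)
--         elif 'nature.com' in url: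
--             categories['nature'].append(paper)
--         elif 'science.org' in url:
--             categories['science'].append(paper)
--         elif 'sciencedirect.com' in url:
--             categories['sciencedirect'].append(paper)
--         elif 'ieee.org' in url:
--             categories['ieee'].append(paper)
--         else:
--             categories['other'].append(paper)
--
--     return categories
-- ===== SOURCE B (Python) =====
-- def categorize_papers(papers):
--     """Categorize papers by source."""
--     rules = [
--         ('pubmed', ['ncbi.nlm.nih.gov', 'pubmed']),
--         ('frontiers', ['frontiersin.org']),
--         ('nature', ['nature.com']),
--         ('science', ['science.org']),
--         ('sciencedirect', ['sciencedirect.com']),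
--         ('ieee', ['ieee.org']),
--     ]
--     # Staged sieve: one filtering pass per category over the papers not yet
--     # claimed by an earlier (higher-priority) category; leftovers are 'other'.
--     categories = {}
--     remaining = list(papers)
--     for cat, subs in rules:
--         matched = []
--         rest = []
--         for paper in remaining:
--             url = paper['url'].lower()
--             if any(sub in url for sub in subs):
--                 matched.append(paper)
--             else:
--                 rest.append(paper)
--         categories[cat] = matched
--         remaining = rest
--     categories['other'] = remaining
--     return categories
-- ===== Notes on version B (the rewrite author's own statement) =====
-- stated objective: alternative
-- what changed: Replaces A's single pass that dispatches each paper through an if/elif cascade by a staged sieve: one filtering pass per category that partitions the still-unclaimed papers, leftovers ending in 'other'.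
-- outside the precondition, e.g. on categorize_papers([{'title': 't'}]): A raises KeyError, B raises KeyError
import Mathlib
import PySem

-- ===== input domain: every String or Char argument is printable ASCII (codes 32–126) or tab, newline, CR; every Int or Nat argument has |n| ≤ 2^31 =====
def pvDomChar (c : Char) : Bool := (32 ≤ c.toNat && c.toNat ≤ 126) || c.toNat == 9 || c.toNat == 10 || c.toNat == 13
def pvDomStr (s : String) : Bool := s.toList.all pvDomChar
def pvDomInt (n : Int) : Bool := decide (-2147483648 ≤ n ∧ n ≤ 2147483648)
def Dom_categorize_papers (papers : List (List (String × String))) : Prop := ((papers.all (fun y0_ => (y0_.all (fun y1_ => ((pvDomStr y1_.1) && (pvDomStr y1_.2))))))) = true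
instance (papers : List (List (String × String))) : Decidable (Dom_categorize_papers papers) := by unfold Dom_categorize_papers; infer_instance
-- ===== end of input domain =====

-- B replaces A's single-pass if/elif dispatch by a staged per-category sieve (partition passes); objective: alternative, same cost.

-- ===== PORT A =====
-- the literal seven-key dict A initializes
def pvCatsInitA : PySem.Dict String (List (List (String × String))) :=
  (((((((PySem.Dict.empty.insert "pubmed" []).insert "frontiers" []).insert "nature" []).insert
      "science" []).insert "sciencedirect" []).insert "ieee" []).insert "other" [])

-- A's loop body: paper['url'] (none = KeyError, excluded by Pre_), then the if/elif cascade
def pvStepA (cats : PySem.Dict String (List (List (String × String))))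
    (paper : List (String × String)) : Option (PySem.Dict String (List (List (String × String)))) :=
  match (PySem.Dict.mk paper).get? "url" with
  | none => none
  | some u =>
    let url := PySem.Str.lower u
    if PySem.Str.isIn "ncbi.nlm.nih.gov" url || PySem.Str.isIn "pubmed" url then
      some (cats.modify "pubmed" [] (· ++ [paper]))
    else if PySem.Str.isIn "frontiersin.org" url then
      some (cats.modify "frontiers" [] (· ++ [paper]))
    else if PySem.Str.isIn "nature.com" url then
      some (cats.modify "nature" [] (· ++ [paper]))
    else if PySem.Str.isIn "science.org" url then
      some (cats.modify "science" [] (· ++ [paper]))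
    else if PySem.Str.isIn "sciencedirect.com" url then
      some (cats.modify "sciencedirect" [] (· ++ [paper]))
    else if PySem.Str.isIn "ieee.org" url then
      some (cats.modify "ieee" [] (· ++ [paper]))
    else
      some (cats.modify "other" [] (· ++ [paper]))

def categorize_papers (papers : List (List (String × String))) : List (String × List (List (String × String))) :=
  match papers.foldl (fun acc paper => acc.bind (fun cats => pvStepA cats paper)) (some pvCatsInitA) with
  | some cats => cats.items
  | none => []

-- ===== PORT B =====
def pvRules : List (String × List String) :=
  [("pubmed", ["ncbi.nlm.nih.gov", "pubmed"]),
   ("frontiers", ["frontiersin.org"]),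
   ("nature", ["nature.com"]),
   ("science", ["science.org"]),
   ("sciencedirect", ["sciencedirect.com"]),
   ("ieee", ["ieee.org"])]

-- Source B's inner pass: split `remaining` into (matched, rest); none = KeyError on a missing 'url'
def pvSieve (subs : List String) :
    List (List (String × String)) →
    Option (List (List (String × String)) × List (List (String × String)))
  | [] => some ([], [])
  | paper :: rem =>
    match (PySem.Dict.mk paper).get? "url" with
    | none => none
    | some u =>
      (pvSieve subs rem).map (fun mr =>
        if subs.any (fun sub => PySem.Str.isIn sub (PySem.Str.lower u)) then
          (paper :: mr.1, mr.2)
        else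
          (mr.1, paper :: mr.2))

def categorize_papers_alt (papers : List (List (String × String))) : List (String × List (List (String × String))) :=
  match pvRules.foldl
      (fun acc r => acc.bind (fun dr =>
        (pvSieve r.2 dr.2).map (fun mr => (dr.1.insert r.1 mr.1, mr.2))))
      (some (PySem.Dict.empty, papers)) with
  | some dr => (dr.1.insert "other" dr.2).items
  | none => []

-- ===== PRECONDITION & SPEC =====
-- Pre_ excludes papers lacking a 'url' key, on which Python A (and B) raise KeyError.
def Pre_categorize_papers (papers : List (List (String × String))) : Prop :=
  (papers.all (fun paper => paper.any (fun kv => kv.1 == "url"))) = true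
instance (papers : List (List (String × String))) : Decidable (Pre_categorize_papers papers) := by unfold Pre_categorize_papers; infer_instance

def pvWitness_categorize_papers : (List (List (String × String))) :=
  [[("url", "https://pubmed.ncbi.nlm.nih.gov/123"), ("title", "t")], [("url", "example.com")]]

def Spec_categorize_papers (papers : List (List (String × String))) (out : List (String × List (List (String × String)))) : Prop := out = categorize_papers_alt papers
instance (papers : List (List (String × String))) (out : List (String × List (List (String × String)))) : Decidable (Spec_categorize_papers papers out) := by unfold Spec_categorize_papers; infer_instance

-- ===== CLAIM (what is proved, stated in full; the proofs are below) =====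
def Claim_equal_categorize_papers : Prop := ∀ (papers : List (List (String × String))), Dom_categorize_papers papers → Pre_categorize_papers papers → Spec_categorize_papers papers (categorize_papers papers)

-- ===== LEMMAS AND PROOFS =====

-- the url of a paper (proof-side abbreviation; under Pre_ it is what both ports read)
def pvUrl (p : List (String × String)) : String := (PySem.Dict.mk p).getD "url" ""

-- rule match: some substring of `subs` occurs in the lowercased url
def pvM (subs : List String) (p : List (String × String)) : Bool :=
  subs.any (fun sub => PySem.Str.isIn sub (PySem.Str.lower (pvUrl p)))

-- the category A's cascade assigns
def pvCls (p : List (String × String)) : String :=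
  if pvM ["ncbi.nlm.nih.gov", "pubmed"] p then "pubmed"
  else if pvM ["frontiersin.org"] p then "frontiers"
  else if pvM ["nature.com"] p then "nature"
  else if pvM ["science.org"] p then "science"
  else if pvM ["sciencedirect.com"] p then "sciencedirect"
  else if pvM ["ieee.org"] p then "ieee"
  else "other"

theorem pvStepA_eq (cats : PySem.Dict String (List (List (String × String))))
    (p : List (String × String)) (u : String)
    (hu : (PySem.Dict.mk p).get? "url" = some u) :
    pvStepA cats p = some (cats.modify (pvCls p) [] (· ++ [p])) := by
  have hurl : pvUrl p = u := by simp [pvUrl, PySem.Dict.getD_eq_get?_getD, hu]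
  simp only [pvStepA, hu, pvCls, pvM, hurl, List.any_cons, List.any_nil, Bool.or_false]
  split_ifs <;> rfl

theorem pvFoldA_eq (papers : List (List (String × String)))
    (h : ∀ p ∈ papers, ((PySem.Dict.mk p).get? "url").isSome)
    (cats : PySem.Dict String (List (List (String × String)))) :
    papers.foldl (fun acc paper => acc.bind (fun cats => pvStepA cats paper)) (some cats)
      = some (papers.foldl (fun cats p => cats.modify (pvCls p) [] (· ++ [p])) cats) := by
  induction papers generalizing cats with
  | nil => rfl
  | cons p rest ih =>
    obtain ⟨u, hu⟩ := Option.isSome_iff_exists.mp (h p (List.mem_cons_self ..))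
    simp only [List.foldl_cons, Option.bind_some, pvStepA_eq cats p u hu]
    exact ih (fun q hq => h q (List.mem_cons_of_mem _ hq)) _

theorem pvSieve_eq (subs : List String) (l : List (List (String × String)))
    (h : ∀ p ∈ l, ((PySem.Dict.mk p).get? "url").isSome) :
    pvSieve subs l = some (l.filter (fun p => pvM subs p), l.filter (fun p => !pvM subs p)) := by
  induction l with
  | nil => rfl
  | cons p rest ih =>
    obtain ⟨u, hu⟩ := Option.isSome_iff_exists.mp (h p (List.mem_cons_self ..))
    have hurl : pvUrl p = u := by simp [pvUrl, PySem.Dict.getD_eq_get?_getD, hu]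
    have hm : (subs.any (fun sub => PySem.Str.isIn sub (PySem.Str.lower u))) = pvM subs p := by
      simp [pvM, hurl]
    simp only [pvSieve, hu, ih (fun q hq => h q (List.mem_cons_of_mem _ hq)), Option.map_some,
      List.filter_cons, hm]
    by_cases hb : pvM subs p = true <;> simp [hb]

-- A's accumulated dict keeps exactly the seven initial keys
theorem pvKeysA (papers : List (List (String × String))) :
    (papers.foldl (fun cats p => cats.modify (pvCls p) [] (· ++ [p])) pvCatsInitA).keys
      = pvCatsInitA.keys := by
  rw [PySem.Dict.keys_foldl_modify_key papers pvCls [] (fun _ p => (· ++ [p])),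
      PySem.Set.update_eq_append_filter]
  have h : (PySem.Set.ofList (papers.map pvCls)).filter
      (fun y => !PySem.Set.contains pvCatsInitA.keys y) = [] := by
    rw [List.filter_eq_nil_iff]
    intro y hy
    obtain ⟨p, _, rfl⟩ := List.mem_map.mp ((PySem.Set.mem_ofList _ _).mp hy)
    unfold pvCls; split_ifs <;> decide
  rw [h, List.append_nil]

-- each bucket of A's dict is the papers A's cascade assigns to it, in order
theorem pvGetDA (papers : List (List (String × String))) (c : String) :
    (papers.foldl (fun cats p => cats.modify (pvCls p) [] (· ++ [p])) pvCatsInitA).getD c []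
      = pvCatsInitA.getD c [] ++ papers.filter (fun p => pvCls p == c) := by
  have h : papers.foldl (fun cats p => cats.modify (pvCls p) [] (· ++ [p])) pvCatsInitA
      = (papers.map (fun p => (pvCls p, p))).foldl
          (fun d q => d.modify q.1 [] (· ++ [q.2])) pvCatsInitA := by
    rw [List.foldl_map]
  rw [h, PySem.Dict.getD_foldl_modify_append, List.filter_map, List.map_map]
  simp [Function.comp_def]

theorem pvNodupKeysA (papers : List (List (String × String))) :
    (papers.foldl (fun cats p => cats.modify (pvCls p) [] (· ++ [p])) pvCatsInitA).keys.Nodup := by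
  exact PySem.Dict.nodup_keys_foldl_modify_key papers pvCls [] (fun _ p => (· ++ [p]))
    pvCatsInitA (by decide)

-- ===== VERDICT (by name: the statement is the Claim_ definition above) =====
theorem categorize_papers_spec : Claim_equal_categorize_papers := by
  intro papers _ hpre
  unfold Spec_categorize_papers
  have hurl : ∀ p ∈ papers, ((PySem.Dict.mk p).get? "url").isSome := by
    intro p hp
    rw [← PySem.Dict.contains_eq_isSome_get?]
    simpa [PySem.Dict.contains_mk] using List.all_eq_true.mp hpre p hp
  have hm : ∀ (q : List (String × String) → Bool), ∀ p ∈ papers.filter q,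
      ((PySem.Dict.mk p).get? "url").isSome :=
    fun _ p hp => hurl p (List.mem_of_mem_filter hp)
  unfold categorize_papers categorize_papers_alt
  rw [pvFoldA_eq papers hurl pvCatsInitA]
  simp only [pvRules, List.foldl_cons, List.foldl_nil, Option.bind_some]
  rw [pvSieve_eq _ papers hurl]
  simp only [Option.bind_some, Option.map_some]
  rw [pvSieve_eq _ _ (hm _)]
  simp only [Option.bind_some, Option.map_some, List.filter_filter]
  rw [pvSieve_eq _ _ (hm _)]
  simp only [Option.bind_some, Option.map_some, List.filter_filter]
  rw [pvSieve_eq _ _ (hm _)]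
  simp only [Option.bind_some, Option.map_some, List.filter_filter]
  rw [pvSieve_eq _ _ (hm _)]
  simp only [Option.bind_some, Option.map_some, List.filter_filter]
  rw [pvSieve_eq _ _ (hm _)]
  simp only [Option.map_some, List.filter_filter]
  rw [PySem.Dict.items_eq_map_keys _ (pvNodupKeysA papers) [], pvKeysA]
  have hkeys : pvCatsInitA.keys = ["pubmed", "frontiers", "nature", "science", "sciencedirect", "ieee", "other"] := by decide
  rw [hkeys]
  simp only [List.map_cons, List.map_nil, pvGetDA,
    show pvCatsInitA.getD "pubmed" [] = [] from rfl,
    show pvCatsInitA.getD "frontiers" [] = [] from rfl,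
    show pvCatsInitA.getD "nature" [] = [] from rfl,
    show pvCatsInitA.getD "science" [] = [] from rfl,
    show pvCatsInitA.getD "sciencedirect" [] = [] from rfl,
    show pvCatsInitA.getD "ieee" [] = [] from rfl,
    show pvCatsInitA.getD "other" [] = [] from rfl,
    List.nil_append]
  simp [PySem.Dict.items_insert, PySem.Dict.contains_insert, PySem.Dict.empty]
  refine ⟨?_, ?_, ?_, ?_, ?_, ?_, ?_⟩ <;>
    (apply List.filter_congr; intro x _; simp only [pvCls]; split_ifs <;> simp_all)
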